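-- pv_equiv track=rewrite | github.com/amaurygaborit/3D_World_On_FPGA | scripts/assembler.py | resolve_imm
-- ===== SOURCE A (Python) =====
-- def resolve_imm(s, syms, current_addr, is_branch=False):
--     # Recursive evaluator for basic math (e.g., 256-MOVE_SPEED)
--     for i in range(len(s)-1, 0, -1):
--         if s[i] in ('+', '-'):
--             left = resolve_imm(s[:i], syms, current_addr, is_branch)
--             right = resolve_imm(s[i+1:], syms, 0, False)
--             return left + right if s[i] == '+' else left - right
--
--     u = s.upper()
--     if u in syms['consts']:
--         return syms['consts'][u]
--     if u in syms['labels']: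
--         target = syms['labels'][u]
--         # Calculate relative branch offset
--         return target - current_addr if is_branch else target
--
--     try:
--         return int(s, 0)
--     except ValueError:
--         raise ValueError(f"Unknown symbol or invalid immediate value: '{s}'")
-- ===== SOURCE B (Python) =====
-- # B: single left-to-right pass collecting signed terms, then a fold; A recurses on the last +/-.
-- def _eval_term(t, syms, current_addr, is_branch):
--     u = t.upper()
--     consts = syms['consts']
--     if u in consts:
--         return consts[u]
--     labels = syms['labels']
--     if u in labels:
--         target = labels[u]
--         return target - current_addr if is_branch else target
--     try:
--         return int(t, 0)
--     except ValueError: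
--         raise ValueError(f"Unknown symbol or invalid immediate value: '{t}'")
--
-- def resolve_imm(s, syms, current_addr, is_branch=False):
--     terms = []
--     sign, start = '+', 0
--     for i in range(1, len(s)):
--         if s[i] in ('+', '-'):
--             terms.append((sign, s[start:i]))
--             sign, start = s[i], i + 1
--     terms.append((sign, s[start:]))
--     acc = _eval_term(terms[0][1], syms, current_addr, is_branch)
--     for op, t in terms[1:]:
--         v = _eval_term(t, syms, 0, False)
--         acc = acc + v if op == '+' else acc - v
--     return acc
-- ===== Notes on version B (the rewrite author's own statement) =====
-- stated objective: alternative
-- what changed: A evaluates by recursing on the last '+'/'-' (re-splitting each left part); B makes one left-to-right pass that collects signed terms (the first term keeps the branch context) and folds them into an accumulator with a single term-evaluation helper.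
import Mathlib
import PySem

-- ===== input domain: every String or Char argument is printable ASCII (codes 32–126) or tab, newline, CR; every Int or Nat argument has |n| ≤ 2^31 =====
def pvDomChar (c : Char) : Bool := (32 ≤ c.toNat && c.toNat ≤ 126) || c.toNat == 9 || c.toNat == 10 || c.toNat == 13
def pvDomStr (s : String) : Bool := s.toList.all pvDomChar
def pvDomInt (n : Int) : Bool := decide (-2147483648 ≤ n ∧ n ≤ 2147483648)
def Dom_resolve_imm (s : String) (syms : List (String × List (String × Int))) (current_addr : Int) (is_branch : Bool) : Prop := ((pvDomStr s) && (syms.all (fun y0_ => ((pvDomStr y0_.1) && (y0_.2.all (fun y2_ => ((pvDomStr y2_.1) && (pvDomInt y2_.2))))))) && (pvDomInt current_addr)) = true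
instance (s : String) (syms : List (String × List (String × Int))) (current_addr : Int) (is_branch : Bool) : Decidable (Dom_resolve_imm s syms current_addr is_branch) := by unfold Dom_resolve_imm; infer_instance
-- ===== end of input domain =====

set_option maxRecDepth 8192


-- B replaces A's recursion on the last '+'/'-' by one left-to-right pass collecting signed
-- terms (first term keeps the branch context) folded into an accumulator; same values everywhere A returns.

-- ===== PORT A =====
def isOpA (c : Char) : Bool := c == '+' || c == '-'

-- the 'for i in range(len(s)-1, 0, -1): if s[i] in ('+','-')' search (returns the index found, if any)
def findOpA (cs : List Char) : Nat → Option Nat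
  | 0 => none
  | i + 1 => if isOpA (cs.getD (i + 1) ' ') then some (i + 1) else findOpA cs i

theorem findOpA_bounds (cs : List Char) : ∀ n i, findOpA cs n = some i → 1 ≤ i ∧ i ≤ n := by
  intro n
  induction n with
  | zero => intro i h; simp [findOpA] at h
  | succ m ih =>
    intro i h
    simp only [findOpA] at h
    split at h
    · cases h; omega
    · have := ih i h; omega

def resolveA (cs : List Char) (syms : List (String × List (String × Int))) (addr : Int) (isb : Bool) : Int :=
  match h : findOpA cs (cs.length - 1) with
  | some i =>
    let left := resolveA (cs.take i) syms addr isb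
    let right := resolveA (cs.drop (i + 1)) syms 0 false
    if cs.getD i ' ' == '+' then left + right else left - right
  | none =>
    let u := PySem.Chars.upper cs
    match List.lookup "consts" syms with
    | none => 0  -- Python raises KeyError here; excluded by Pre_
    | some consts =>
      match List.lookup (String.mk u) consts with
      | some v => v
      | none =>
        match List.lookup "labels" syms with
        | none => 0  -- Python raises KeyError here; excluded by Pre_
        | some labels =>
          match List.lookup (String.mk u) labels with
          | some target => if isb then target - addr else target
          | none => (PySem.Int.ofCharsBase? cs 0).getD 0  -- none = ValueError; excluded by Pre_
termination_by cs.length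
decreasing_by
  · have := findOpA_bounds cs (cs.length - 1) i h
    simp only [List.length_take]; omega
  · have := findOpA_bounds cs (cs.length - 1) i h
    simp only [List.length_drop]; omega

def resolve_imm (s : String) (syms : List (String × List (String × Int))) (current_addr : Int) (is_branch : Bool) : Int :=
  resolveA s.toList syms current_addr is_branch

-- ===== PORT B =====
def isOpB (c : Char) : Bool := c == '+' || c == '-'

-- _eval_term: consts lookup, then labels (branch-relative), then int(t, 0)
def evalTermB (t : List Char) (syms : List (String × List (String × Int))) (addr : Int) (isb : Bool) : Int :=
  let u := PySem.Chars.upper t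
  match List.lookup "consts" syms with
  | none => 0  -- KeyError; excluded by Pre_
  | some consts =>
    match List.lookup (String.mk u) consts with
    | some v => v
    | none =>
      match List.lookup "labels" syms with
      | none => 0  -- KeyError; excluded by Pre_
      | some labels =>
        match List.lookup (String.mk u) labels with
        | some target => if isb then target - addr else target
        | none => (PySem.Int.ofCharsBase? t 0).getD 0  -- none = ValueError; excluded by Pre_

-- the collecting pass: 'for i in range(1, len(s))' with state (sign, start, terms);
-- s[start:i] with 0 ≤ start ≤ i is exactly (cs.drop start).take (i - start)
def scanB (cs : List Char) (i : Nat) (sign : Char) (start : Nat)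
    (terms : List (Char × List Char)) : List (Char × List Char) :=
  if h : i < cs.length then
    if isOpB cs[i] then
      scanB cs (i + 1) cs[i] (i + 1) (terms ++ [(sign, (cs.drop start).take (i - start))])
    else
      scanB cs (i + 1) sign start terms
  else
    terms ++ [(sign, cs.drop start)]
termination_by cs.length - i

def resolveB (cs : List Char) (syms : List (String × List (String × Int))) (addr : Int) (isb : Bool) : Int :=
  match scanB cs 1 '+' 0 [] with
  | [] => 0  -- unreachable: scanB always appends the final term
  | (_, t0) :: rest =>
    rest.foldl
      (fun acc p => if p.1 == '+' then acc + evalTermB p.2 syms 0 false else acc - evalTermB p.2 syms 0 false)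
      (evalTermB t0 syms addr isb)

def resolve_imm_alt (s : String) (syms : List (String × List (String × Int))) (current_addr : Int) (is_branch : Bool) : Int :=
  resolveB s.toList syms current_addr is_branch

-- ===== PRECONDITION & SPEC =====
def isOpP (c : Char) : Bool := c == '+' || c == '-'

-- split every '+'/'-' (used on the tail, where every operator separates): (first chunk, signed later chunks)
def goP : List Char → List Char × List (Char × List Char)
  | [] => ([], [])
  | c :: rest =>
    let g := goP rest
    if isOpP c then ([], (c, g.1) :: g.2) else (c :: g.1, g.2)

-- the terms of s: a '+'/'-' at position 0 starts the first term instead of separating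
def stermsP (cs : List Char) : List Char × List (Char × List Char) :=
  match cs with
  | [] => ([], [])
  | c :: rest => let g := goP rest; (c :: (goP rest).1, (goP rest).2)

-- a single term resolves without an exception: syms has 'consts' (and 'labels' when needed),
-- and the term is a known const, a known label, or a valid int(t, 0) literal
def termOkP (t : List Char) (syms : List (String × List (String × Int))) : Bool :=
  match List.lookup "consts" syms with
  | none => false
  | some consts =>
    if (List.lookup (String.mk (PySem.Chars.upper t)) consts).isSome then true
    else
      match List.lookup "labels" syms with
      | none => false
      | some labels =>
        (List.lookup (String.mk (PySem.Chars.upper t)) labels).isSome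
          || (PySem.Int.ofCharsBase? t 0).isSome

-- exactly the inputs on which the Python A returns (otherwise it raises KeyError/ValueError)
def Pre_resolve_imm (s : String) (syms : List (String × List (String × Int))) (current_addr : Int) (is_branch : Bool) : Prop :=
  (termOkP (stermsP s.toList).1 syms
    && (stermsP s.toList).2.all (fun p => termOkP p.2 syms)) = true
instance (s : String) (syms : List (String × List (String × Int))) (current_addr : Int) (is_branch : Bool) : Decidable (Pre_resolve_imm s syms current_addr is_branch) := by unfold Pre_resolve_imm; infer_instance

def pvWitness_resolve_imm : String × (List (String × List (String × Int))) × Int × Bool :=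
  ("A+2-B", [("consts", [("A", 5)]), ("labels", [("B", 9)])], 3, true)

def Spec_resolve_imm (s : String) (syms : List (String × List (String × Int))) (current_addr : Int) (is_branch : Bool) (out : Int) : Prop := out = resolve_imm_alt s syms current_addr is_branch
instance (s : String) (syms : List (String × List (String × Int))) (current_addr : Int) (is_branch : Bool) (out : Int) : Decidable (Spec_resolve_imm s syms current_addr is_branch out) := by unfold Spec_resolve_imm; infer_instance

-- ===== CLAIM (what is proved, stated in full; the proofs are below) =====
def Claim_equal_resolve_imm : Prop := ∀ (s : String) (syms : List (String × List (String × Int))) (current_addr : Int) (is_branch : Bool), Dom_resolve_imm s syms current_addr is_branch → Pre_resolve_imm s syms current_addr is_branch → Spec_resolve_imm s syms current_addr is_branch (resolve_imm s syms current_addr is_branch)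

-- ===== LEMMAS AND PROOFS =====

-- the left-associated fold of the signed terms (the common shape both ports reduce to)
def foldT (p : List Char × List (Char × List Char)) (syms : List (String × List (String × Int))) (addr : Int) (isb : Bool) : Int :=
  p.2.foldl
    (fun acc q => if q.1 == '+' then acc + evalTermB q.2 syms 0 false else acc - evalTermB q.2 syms 0 false)
    (evalTermB p.1 syms addr isb)

def opFree (cs : List Char) : Bool := cs.all (fun c => !isOpP c)

theorem goP_opFree (cs : List Char) (h : opFree cs = true) : goP cs = (cs, []) := by
  induction cs with
  | nil => rfl
  | cons c rest ih =>
    simp [opFree, List.all_cons] at h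
    have hr : opFree rest = true := by
      rw [opFree, List.all_eq_true]; intro x hx; simp [h.2 x hx]
    simp [goP, h.1, ih hr]

theorem goP_cons_op (c : Char) (rest : List Char) (h : isOpP c = true) :
    goP (c :: rest) = ([], (c, (goP rest).1) :: (goP rest).2) := by simp [goP, h]

theorem goP_cons_not (c : Char) (rest : List Char) (h : isOpP c = false) :
    goP (c :: rest) = (c :: (goP rest).1, (goP rest).2) := by simp [goP, h]

theorem isOpP_eq_isOpA : isOpP = isOpA := rfl
theorem isOpP_eq_isOpB : isOpP = isOpB := rfl

theorem goP_split (cs : List Char) : ∀ j (hj : j < cs.length), isOpP cs[j] = true →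
    opFree (cs.drop (j + 1)) = true →
    goP cs = ((goP (cs.take j)).1, (goP (cs.take j)).2 ++ [(cs[j], cs.drop (j + 1))]) := by
  induction cs with
  | nil => intro j hj; simp at hj
  | cons c rest ih =>
    intro j hj hop hfree
    cases j with
    | zero =>
      simp at hop hfree ⊢
      simp [goP, hop, goP_opFree rest hfree]
    | succ m =>
      simp at hj hop hfree
      have := ih m hj hop hfree
      simp only [List.take_succ_cons, goP, this]
      by_cases hc : isOpP c = true
      · simp [hc]
      · simp [hc]

theorem scanB_spec (cs : List Char) :
    ∀ n i sign start terms, cs.length - i = n → start ≤ i →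
    scanB cs i sign start terms
      = terms ++ (sign, (cs.drop start).take (i - start) ++ (goP (cs.drop i)).1) :: (goP (cs.drop i)).2 := by
  intro n
  induction n with
  | zero =>
    intro i sign start terms hn hsi
    have hge : cs.length ≤ i := by omega
    rw [scanB, dif_neg (by omega), List.drop_eq_nil_of_le hge,
      List.take_of_length_le (by rw [List.length_drop]; omega)]
    simp [goP]
  | succ m ih =>
    intro i sign start terms hn hsi
    have hlt : i < cs.length := by omega
    have hdropi : cs.drop i = cs[i] :: cs.drop (i + 1) := List.drop_eq_getElem_cons hlt
    rw [scanB]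
    simp only [hlt, dif_pos]
    by_cases hop : isOpB cs[i] = true
    · rw [if_pos hop]
      rw [ih (i + 1) cs[i] (i + 1) _ (by omega) (by omega)]
      have hthis : isOpP cs[i] = true := by rw [isOpP_eq_isOpB]; exact hop
      rw [hdropi, goP_cons_op _ _ hthis]
      simp
    · rw [if_neg hop]
      rw [ih (i + 1) sign start _ (by omega) (by omega)]
      have hidx : (cs.drop start)[i - start]? = some cs[i] := by
        rw [List.getElem?_drop]
        rw [List.getElem?_eq_getElem (by omega)]
        congr 1
        congr 1
        omega
      have htake : (cs.drop start).take (i + 1 - start) = (cs.drop start).take (i - start) ++ [cs[i]] := by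
        have : i + 1 - start = (i - start) + 1 := by omega
        rw [this, List.take_succ, hidx]
        rfl
      have hthis : isOpP cs[i] = false := by rw [isOpP_eq_isOpB]; simpa using hop
      rw [htake, hdropi, goP_cons_not _ _ hthis]
      simp

theorem resolveB_eq_foldT (cs : List Char) (syms : List (String × List (String × Int))) (addr : Int) (isb : Bool) :
    resolveB cs syms addr isb = foldT (stermsP cs) syms addr isb := by
  unfold resolveB
  rw [scanB_spec cs (cs.length - 1) 1 '+' 0 [] (by omega) (by omega)]
  cases cs with
  | nil => simp [goP, stermsP, foldT]
  | cons c rest => simp [stermsP, foldT]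

theorem findOpA_last (cs : List Char) : ∀ n i, findOpA cs n = some i →
    isOpA (cs.getD i ' ') = true ∧ ∀ j, i < j → j ≤ n → isOpA (cs.getD j ' ') = false := by
  intro n
  induction n with
  | zero => intro i h; simp [findOpA] at h
  | succ m ih =>
    intro i h
    simp only [findOpA] at h
    split at h
    · rename_i hop
      cases h
      exact ⟨hop, by intro j h1 h2; omega⟩
    · rename_i hop
      obtain ⟨h1, h2⟩ := ih i h
      have hb := findOpA_bounds cs m i h
      refine ⟨h1, ?_⟩
      intro j hj1 hj2
      rcases Nat.lt_or_ge j (m + 1) with hc | hc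
      · exact h2 j hj1 (by omega)
      · have : j = m + 1 := by omega
        subst this
        simpa using hop
  
theorem findOpA_none (cs : List Char) : ∀ n, findOpA cs n = none →
    ∀ j, 1 ≤ j → j ≤ n → isOpA (cs.getD j ' ') = false := by
  intro n
  induction n with
  | zero => intro _ j h1 h2; omega
  | succ m ih =>
    intro h j h1 h2
    simp only [findOpA] at h
    split at h
    · exact absurd h (by simp)
    · rename_i hop
      rcases Nat.lt_or_ge j (m + 1) with hc | hc
      · exact ih h j h1 (by omega)
      · have : j = m + 1 := by omega
        subst this
        simpa using hop

theorem opFree_of_no_op (cs : List Char) (k : Nat)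
    (h : ∀ j, k + 1 ≤ j → j ≤ cs.length - 1 → isOpA (cs.getD j ' ') = false) :
    opFree (cs.drop (k + 1)) = true := by
  rw [opFree, List.all_eq_true]
  intro c hc
  obtain ⟨m, hm, hme⟩ := List.getElem_of_mem hc
  have hlen := hm
  rw [List.length_drop] at hlen
  have : (cs.drop (k + 1))[m] = cs[k + 1 + m]'(by omega) := by
    rw [List.getElem_drop]
  have hd : cs.getD (k + 1 + m) ' ' = c := by
    rw [List.getD_eq_getElem cs ' ' (by omega), ← this, hme]
  have := h (k + 1 + m) (by omega) (by omega)
  rw [hd] at this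
  simp [isOpA] at this
  simp [isOpP, this.1, this.2]

-- A's base-case lookup chain is B's _eval_term
theorem baseA_eq_evalTermB (cs : List Char) (syms : List (String × List (String × Int))) (addr : Int) (isb : Bool) :
    (let u := PySem.Chars.upper cs
     match List.lookup "consts" syms with
     | none => (0 : Int)
     | some consts =>
       match List.lookup (String.mk u) consts with
       | some v => v
       | none =>
         match List.lookup "labels" syms with
         | none => 0
         | some labels =>
           match List.lookup (String.mk u) labels with
           | some target => if isb then target - addr else target
           | none => (PySem.Int.ofCharsBase? cs 0).getD 0) = evalTermB cs syms addr isb := rfl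

theorem resolveA_eq_foldT (cs : List Char) (syms : List (String × List (String × Int))) (addr : Int) (isb : Bool) :
    resolveA cs syms addr isb = foldT (stermsP cs) syms addr isb := by
  generalize hfuel : cs.length = n
  induction n using Nat.strong_induction_on generalizing cs addr isb with
  | _ n ih =>
  subst hfuel
  rw [resolveA]
  split
  · rename_i i hfind
    obtain ⟨hi1, hi2⟩ := findOpA_bounds cs (cs.length - 1) i hfind
    obtain ⟨hop, hnone⟩ := findOpA_last cs (cs.length - 1) i hfind
    have hilen : i < cs.length := by omega
    have hfree : opFree (cs.drop (i + 1)) = true := opFree_of_no_op cs i hnone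
    have hgd : cs.getD i ' ' = cs[i] := List.getD_eq_getElem cs ' ' hilen
    obtain ⟨c, rest, rfl⟩ : ∃ c rest, cs = c :: rest := by
      cases cs with
      | nil => simp at hilen
      | cons a b => exact ⟨a, b, rfl⟩
    obtain ⟨j, rfl⟩ : ∃ j, i = j + 1 := ⟨i - 1, by omega⟩
    have hrj : j < rest.length := by simp at hilen; omega
    have hopj : isOpP rest[j] = true := by
      rw [isOpP_eq_isOpA]; rw [hgd] at hop; simpa using hop
    have hfree' : opFree (rest.drop (j + 1)) = true := hfree
    have hsplit := goP_split rest j hrj hopj hfree'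
    have htake : (c :: rest).take (j + 1) = c :: rest.take j := rfl
    -- the right part is op-free, so A's recursive call on it is the bare lookup chain
    have hrightA : resolveA ((c :: rest).drop (j + 2)) syms 0 false
        = evalTermB ((c :: rest).drop (j + 2)) syms 0 false := by
      rw [resolveA]
      have hfn : findOpA ((c :: rest).drop (j + 2)) (((c :: rest).drop (j + 2)).length - 1) = none := by
        cases hf : findOpA ((c :: rest).drop (j + 2)) (((c :: rest).drop (j + 2)).length - 1) with
        | none => rfl
        | some k =>
          obtain ⟨hk1, hk2⟩ := findOpA_bounds _ _ _ hf
          obtain ⟨hkop, _⟩ := findOpA_last _ _ _ hf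
          have hklen : k < ((c :: rest).drop (j + 2)).length := by
            simp at hk2 ⊢; omega
          rw [List.getD_eq_getElem _ ' ' hklen] at hkop
          rw [opFree, List.all_eq_true] at hfree
          have h2 := hfree _ (List.getElem_mem hklen)
          rw [isOpP_eq_isOpA, hkop] at h2
          simp at h2
      rw [hfn]
      rfl
    have hleftA := ih (j + 1) (by simp; omega) ((c :: rest).take (j + 1)) addr isb
      (by simp [List.length_take]; omega)
    rw [hleftA, hrightA]
    simp only [stermsP, htake, hsplit, foldT]
    rw [List.foldl_append]
    rw [hgd]
    simp
  · rename_i hfind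
    have hnone := findOpA_none cs (cs.length - 1) hfind
    rw [baseA_eq_evalTermB]
    cases cs with
    | nil => rfl
    | cons c rest =>
      have hfree : opFree rest = true := by
        have := opFree_of_no_op (c :: rest) 0 (by intro j h1 h2; exact hnone j h1 h2)
        simpa using this
      simp [stermsP, goP_opFree rest hfree, foldT]

-- ===== VERDICT (by name: the statement is the Claim_ definition above) =====
theorem resolve_imm_spec : Claim_equal_resolve_imm := by
  intro s syms current_addr is_branch _ _
  unfold Spec_resolve_imm resolve_imm resolve_imm_alt
  rw [resolveA_eq_foldT, resolveB_eq_foldT]
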